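-- pv_equiv track=rewrite | github.com/thefl0ur/advent-of-code-2021 | 14/part1.py | parce
-- ===== SOURCE A (Python) =====
-- def parce(data):
--     separator_finded = False
--     template = ''
--     replacements = {}
--
--     for line in data:
--         if line == '':
--             separator_finded = True
--             continue
--
--         if not separator_finded:
--             template = line
--         else:
--             k, v = line.split(' -> ')
--             replacements[k] = v
--
--     return (template, replacements)
-- ===== SOURCE B (Python) =====
-- def parce(data):
--     # Split at the first blank line instead of scanning with a flag.
--     if '' in data:
--         i = data.index('')
--         head, tail = data[:i], data[i + 1:]
--     else:
--         head, tail = data, []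
--     template = head[-1] if head else ''
--     replacements = dict(line.split(' -> ') for line in tail if line != '')
--     return (template, replacements)
-- ===== Notes on version B (the rewrite author's own statement) =====
-- stated objective: simpler
-- what changed: Instead of a one-pass scan with a separator flag and an overwritten template variable, B splits the list once at the first blank line, takes the last element of the prefix as the template, and builds the rules dict from the filtered suffix.
import Mathlib
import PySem

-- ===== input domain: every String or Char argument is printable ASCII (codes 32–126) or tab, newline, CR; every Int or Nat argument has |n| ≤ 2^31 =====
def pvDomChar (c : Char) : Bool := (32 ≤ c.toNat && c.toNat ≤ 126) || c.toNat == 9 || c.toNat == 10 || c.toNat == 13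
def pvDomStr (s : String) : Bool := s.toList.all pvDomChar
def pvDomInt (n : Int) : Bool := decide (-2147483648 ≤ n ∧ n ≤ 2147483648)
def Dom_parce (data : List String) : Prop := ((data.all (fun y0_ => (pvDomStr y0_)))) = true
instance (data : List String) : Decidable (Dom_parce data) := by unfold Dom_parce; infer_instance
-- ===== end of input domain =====

-- B splits the input at the first blank line instead of scanning with a flag; equal return value proved on Pre_.

-- ===== PORT A =====
-- state: (separator_finded, template, replacements)
def parceStep (st : Bool × String × PySem.Dict String String) (line : String) :
    Bool × String × PySem.Dict String String :=
  if line = "" then (true, st.2.1, st.2.2)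
  else if st.1 then
    match PySem.Str.split? line " -> " with
    | some [k, v] => (true, st.2.1, st.2.2.insert k v)
    | _ => st      -- Python raises ValueError here (unpack of k, v); excluded by Pre_parce
  else (false, line, st.2.2)

def parce (data : List String) : String × (List (String × String)) :=
  let r := data.foldl parceStep (false, "", PySem.Dict.empty)
  (r.2.1, r.2.2.items)

-- ===== PORT B =====
-- dict(line.split(' -> ') for line in tail if line != '')
def parceRules (tail : List String) : PySem.Dict String String :=
  (tail.filter (fun l => l ≠ "")).foldl (fun d l =>
    match PySem.Str.split? l " -> " with
    | some [k, v] => d.insert k v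
    | _ => d     -- Python's dict(...) raises ValueError here; excluded by Pre_parce
    ) PySem.Dict.empty

def parce_alt (data : List String) : String × (List (String × String)) :=
  let p : List String × List String :=
    if "" ∈ data then (data.take (data.idxOf ""), data.drop (data.idxOf "" + 1))
    else (data, [])
  (p.1.getLastD "", (parceRules p.2).items)

-- ===== PRECONDITION & SPEC =====
-- Pre_ excludes exactly the inputs where A raises ValueError: a nonempty line after the
-- first blank line that does not split on ' -> ' into exactly two parts.
def Pre_parce (data : List String) : Prop :=
  ∀ l ∈ data.drop (data.idxOf "" + 1), l ≠ "" → ((PySem.Str.split? l " -> ").getD []).length = 2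
instance (data : List String) : Decidable (Pre_parce data) := by unfold Pre_parce; infer_instance
def pvWitness_parce : List String := ["NNCB", "", "NN -> B", "CB -> H"]

def Spec_parce (data : List String) (out : String × (List (String × String))) : Prop := out = parce_alt data
instance (data : List String) (out : String × (List (String × String))) : Decidable (Spec_parce data out) := by unfold Spec_parce; infer_instance

-- ===== CLAIM (what is proved, stated in full; the proofs are below) =====
def Claim_equal_parce : Prop := ∀ (data : List String), Dom_parce data → Pre_parce data → Spec_parce data (parce data)

-- ===== LEMMAS AND PROOFS =====

theorem lastD_cons {α : Type} (x t : α) (l : List α) : (x :: l).getLast?.getD t = l.getLast?.getD x := by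
  induction l generalizing x t with
  | nil => rfl
  | cons y ys ih => rw [List.getLast?_cons_cons, ih y t, ih y x]

-- once the separator is found, the template is frozen and nonempty lines fold into the dict
theorem foldl_parceStep_true (l : List String) (t : String) (d : PySem.Dict String String) :
    List.foldl parceStep (true, t, d) l =
      (true, t, (l.filter (fun s => s ≠ "")).foldl (fun d l =>
        match PySem.Str.split? l " -> " with
        | some [k, v] => d.insert k v
        | _ => d) d) := by
  induction l generalizing d with
  | nil => rfl
  | cons x xs ih =>
    rw [List.foldl_cons, List.filter_cons]
    by_cases hx : x = ""
    · subst hx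
      have h1 : parceStep (true, t, d) "" = (true, t, d) := by simp [parceStep]
      rw [h1, ih]
      simp
    · rw [if_pos (by simp [hx] : decide (x ≠ "") = true), List.foldl_cons]
      have h1 : parceStep (true, t, d) x =
        (true, t, (match PySem.Str.split? x " -> " with
                   | some [k, v] => d.insert k v
                   | _ => d)) := by
        unfold parceStep
        rw [if_neg hx]
        rcases PySem.Str.split? x " -> " with _ | (_ | ⟨k, _ | ⟨v, _ | ⟨w, r⟩⟩⟩) <;> rfl
      rw [h1, ih]

-- the scan before/without the separator, characterised by the first blank line
theorem foldl_parceStep_false (data : List String) (t : String) (d : PySem.Dict String String) :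
    List.foldl parceStep (false, t, d) data =
      if "" ∈ data then
        (true, (data.take (data.idxOf "")).getLastD t,
          ((data.drop (data.idxOf "" + 1)).filter (fun s => s ≠ "")).foldl (fun d l =>
            match PySem.Str.split? l " -> " with
            | some [k, v] => d.insert k v
            | _ => d) d)
      else (false, data.getLastD t, d) := by
  induction data generalizing t with
  | nil => simp
  | cons x xs ih =>
    rw [List.foldl_cons]
    by_cases hx : x = ""
    · subst hx
      have h1 : parceStep (false, t, d) "" = (true, t, d) := by simp [parceStep]
      rw [h1, foldl_parceStep_true, if_pos (List.mem_cons_self)]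
      simp
    · have h1 : parceStep (false, t, d) x = (false, x, d) := by simp [parceStep, hx]
      rw [h1, ih x]
      have hidx : (x :: xs).idxOf "" = xs.idxOf "" + 1 := by
        simp [hx]
      by_cases hmem : "" ∈ xs
      · rw [if_pos hmem, if_pos (List.mem_cons_of_mem _ hmem), hidx]
        simp [lastD_cons]
      · rw [if_neg hmem, if_neg (by simp [hmem, Ne.symm hx])]
        simp [lastD_cons]

-- ===== VERDICT (by name: the statement is the Claim_ definition above) =====
theorem parce_spec : Claim_equal_parce := by
  intro data _ _
  unfold Spec_parce parce parce_alt parceRules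
  rw [foldl_parceStep_false]
  by_cases h : "" ∈ data <;> simp [h]
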